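-- pv_equiv track=rewrite | github.com/benjfield/advent_of_code | advent/year_2019/day_17.py | possible_stripped_journeys
-- ===== SOURCE A (Python) =====
-- def possible_stripped_journeys(
--         letter_to_replace,
--         array_to_strip,
--         journey_remainder):
--     array_length = len(array_to_strip)
--
--     if len(journey_remainder) < array_length:
--         return [journey_remainder]
--     else:
--         possible_journeys = [journey_remainder]
--         for potential_start in range(len(journey_remainder) - array_length + 1):
--             if journey_remainder[potential_start:potential_start+array_length] == array_to_strip:
--                 remainder_journeys = possible_stripped_journeys(letter_to_replace, array_to_strip, journey_remainder[potential_start+array_length:])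
--                 for remainder_journey in remainder_journeys:
--                     possible_journeys.append(journey_remainder[:potential_start] + [letter_to_replace] + remainder_journey)
--
--         return possible_journeys
-- ===== SOURCE B (Python) =====
-- def possible_stripped_journeys(
--         letter_to_replace,
--         array_to_strip,
--         journey_remainder):
--     # Bottom-up DP over suffix start positions instead of recursion.
--     L = len(array_to_strip)
--     n = len(journey_remainder)
--     res = [None] * (n + 1)
--     for i in range(n, -1, -1):
--         cur = [journey_remainder[i:]]
--         for s in range(i, n - L + 1):
--             if journey_remainder[s:s + L] == array_to_strip:
--                 pre = journey_remainder[i:s]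
--                 for r in res[s + L]:
--                     cur.append(pre + [letter_to_replace] + r)
--         res[i] = cur
--     return res[0]
-- ===== Notes on version B (the rewrite author's own statement) =====
-- stated objective: alternative
-- what changed: Replaces A's top-down recursion on suffixes by an iterative bottom-up DP: a table res[i] of all stripped journeys of the suffix starting at i is filled from i=n down to 0 and res[0] is returned, so each suffix is computed once instead of re-recursed at every match.
import Mathlib
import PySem

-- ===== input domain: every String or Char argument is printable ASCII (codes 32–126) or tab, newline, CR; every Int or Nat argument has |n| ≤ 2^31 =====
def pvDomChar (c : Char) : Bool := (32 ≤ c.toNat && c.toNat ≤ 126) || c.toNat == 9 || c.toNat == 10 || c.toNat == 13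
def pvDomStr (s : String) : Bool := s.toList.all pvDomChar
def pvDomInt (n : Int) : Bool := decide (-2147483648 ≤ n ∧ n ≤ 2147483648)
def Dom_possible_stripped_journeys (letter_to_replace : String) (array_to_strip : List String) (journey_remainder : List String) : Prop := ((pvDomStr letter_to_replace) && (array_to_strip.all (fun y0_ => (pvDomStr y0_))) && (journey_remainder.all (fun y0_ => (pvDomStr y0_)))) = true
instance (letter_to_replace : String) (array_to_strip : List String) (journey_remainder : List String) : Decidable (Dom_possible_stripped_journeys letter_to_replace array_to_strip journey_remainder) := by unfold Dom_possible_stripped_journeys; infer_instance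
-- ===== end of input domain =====

-- B replaces A's top-down recursion by a bottom-up table over suffix start positions
-- (objective: alternative decomposition, one shared row per suffix instead of re-recursing).

-- ===== PORT A =====
-- Literal port of A's recursion; `fuel` only makes the Python recursion total in Lean
-- (on Pre_ inputs, array_to_strip ≠ [], fuel = length+1 is never exhausted; Python's
-- slices here have nonnegative in-range bounds, so take/drop are exact).
def pA (letter_to_replace : String) (array_to_strip : List String) : Nat → List String → List (List String)
  | 0, _ => []
  | fuel + 1, journey_remainder =>
    let array_length := array_to_strip.length
    if journey_remainder.length < array_length then [journey_remainder]
    else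
      (List.range (journey_remainder.length - array_length + 1)).foldl (fun possible_journeys potential_start =>
        if ((journey_remainder.drop potential_start).take array_length) = array_to_strip then
          possible_journeys ++
            (pA letter_to_replace array_to_strip fuel (journey_remainder.drop (potential_start + array_length))).map
              (fun remainder_journey => journey_remainder.take potential_start ++ letter_to_replace :: remainder_journey)
        else possible_journeys) [journey_remainder]

def possible_stripped_journeys (letter_to_replace : String) (array_to_strip : List String) (journey_remainder : List String) : List (List String) :=
  pA letter_to_replace array_to_strip (journey_remainder.length + 1) journey_remainder

-- ===== PORT B =====
-- One row of the table: res[i], given tabs = [res[i+1], …, res[n]].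
def pBrow (letter_to_replace : String) (array_to_strip : List String) (journey_remainder : List String) (i : Nat) (tabs : List (List (List String))) : List (List String) :=
  let L := array_to_strip.length
  let n := journey_remainder.length
  (List.range' i ((n + 1 - L) - i)).foldl (fun cur s =>
    if ((journey_remainder.drop s).take L) = array_to_strip then
      cur ++ (tabs.getD (s + L - (i + 1)) []).map
        (fun r => (journey_remainder.drop i).take (s - i) ++ letter_to_replace :: r)
    else cur) [journey_remainder.drop i]

-- Builds [res[n+1-k], …, res[n]] bottom-up (the Python loop `for i in range(n, -1, -1)`).
def pBtab (letter_to_replace : String) (array_to_strip : List String) (journey_remainder : List String) : Nat → List (List (List String))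
  | 0 => []
  | k + 1 =>
    let tabs := pBtab letter_to_replace array_to_strip journey_remainder k
    pBrow letter_to_replace array_to_strip journey_remainder (journey_remainder.length - k) tabs :: tabs

def possible_stripped_journeys_alt (letter_to_replace : String) (array_to_strip : List String) (journey_remainder : List String) : List (List String) :=
  (pBtab letter_to_replace array_to_strip journey_remainder (journey_remainder.length + 1)).headD []

-- ===== PRECONDITION & SPEC =====
-- Pre_ excludes array_to_strip = [], on which Python A recurses forever on the same
-- argument and raises RecursionError (B there indexes an unfilled table cell and raises too).
def Pre_possible_stripped_journeys (letter_to_replace : String) (array_to_strip : List String) (journey_remainder : List String) : Prop := array_to_strip ≠ []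
instance (letter_to_replace : String) (array_to_strip : List String) (journey_remainder : List String) : Decidable (Pre_possible_stripped_journeys letter_to_replace array_to_strip journey_remainder) := by unfold Pre_possible_stripped_journeys; infer_instance

def pvWitness_possible_stripped_journeys : String × List String × List String := ("A", (["R", "8"], ["R", "8", "L", "R", "8"]))

def Spec_possible_stripped_journeys (letter_to_replace : String) (array_to_strip : List String) (journey_remainder : List String) (out : List (List String)) : Prop := out = possible_stripped_journeys_alt letter_to_replace array_to_strip journey_remainder
instance (letter_to_replace : String) (array_to_strip : List String) (journey_remainder : List String) (out : List (List String)) : Decidable (Spec_possible_stripped_journeys letter_to_replace array_to_strip journey_remainder out) := by unfold Spec_possible_stripped_journeys; infer_instance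

-- ===== CLAIM (what is proved, stated in full; the proofs are below) =====
def Claim_equal_possible_stripped_journeys : Prop := ∀ (letter_to_replace : String) (array_to_strip : List String) (journey_remainder : List String), Dom_possible_stripped_journeys letter_to_replace array_to_strip journey_remainder → Pre_possible_stripped_journeys letter_to_replace array_to_strip journey_remainder → Spec_possible_stripped_journeys letter_to_replace array_to_strip journey_remainder (possible_stripped_journeys letter_to_replace array_to_strip journey_remainder)

-- ===== LEMMAS AND PROOFS =====

-- With nonempty pattern, the fuel is irrelevant as soon as it exceeds the list length.
theorem pA_fuel_irrel (l : String) (strip : List String) (hs : strip ≠ []) :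
    ∀ (m : Nat) (j : List String), j.length ≤ m →
      ∀ f₁ f₂, j.length < f₁ → j.length < f₂ →
        pA l strip f₁ j = pA l strip f₂ j := by
  have hL : 1 ≤ strip.length := List.length_pos_iff.mpr hs
  intro m
  induction m with
  | zero =>
    intro j hj f₁ f₂ h₁ h₂
    obtain ⟨a, rfl⟩ : ∃ a, f₁ = a + 1 := ⟨f₁ - 1, by omega⟩
    obtain ⟨b, rfl⟩ : ∃ b, f₂ = b + 1 := ⟨f₂ - 1, by omega⟩
    have hlt : j.length < strip.length := by omega
    simp [pA, hlt]
  | succ m ih =>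
    intro j hj f₁ f₂ h₁ h₂
    obtain ⟨a, rfl⟩ : ∃ a, f₁ = a + 1 := ⟨f₁ - 1, by omega⟩
    obtain ⟨b, rfl⟩ : ∃ b, f₂ = b + 1 := ⟨f₂ - 1, by omega⟩
    by_cases hlt : j.length < strip.length
    · simp [pA, hlt]
    · simp only [pA, if_neg hlt]
      apply PySem.List.foldl_congr_mem
      intro acc p hp
      have hp' : p < j.length - strip.length + 1 := List.mem_range.mp hp
      by_cases ht : (j.drop p).take strip.length = strip
      · simp only [if_pos ht]
        have hdrop : (j.drop (p + strip.length)).length = j.length - (p + strip.length) := by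
          simp
        have : pA l strip a (j.drop (p + strip.length)) = pA l strip b (j.drop (p + strip.length)) := by
          apply ih _ (by omega) _ _ (by omega) (by omega)
        rw [this]
      · simp only [if_neg ht]

-- A row computed from a correct table is A's value on the corresponding suffix.
theorem pBrow_correct (l : String) (strip : List String) (j : List String) (hs : strip ≠ [])
    (i : Nat) (hi : i ≤ j.length) :
    pBrow l strip j i ((List.range' (i + 1) (j.length - i)).map
      (fun t => pA l strip ((j.drop t).length + 1) (j.drop t)))
      = pA l strip ((j.drop i).length + 1) (j.drop i) := by
  have hL : 1 ≤ strip.length := List.length_pos_iff.mpr hs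
  have hdl : (j.drop i).length = j.length - i := by simp
  simp only [pBrow]
  rw [hdl]
  by_cases hc : j.length - i < strip.length
  · have hcnt : (j.length + 1 - strip.length) - i = 0 := by omega
    rw [hcnt]
    rw [pA]
    simp [hdl, hc]
  · have hcnt : (j.length + 1 - strip.length) - i = (j.length - i) - strip.length + 1 := by omega
    rw [hcnt]
    conv_rhs => rw [pA]
    rw [if_neg (by rw [hdl]; exact hc)]
    rw [hdl]
    rw [show List.range' i ((j.length - i) - strip.length + 1)
          = (List.range ((j.length - i) - strip.length + 1)).map (fun p => i + p) by
        rw [List.range'_eq_map_range], List.foldl_map]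
    apply PySem.List.foldl_congr_mem
    intro acc p hp
    have hp' : p < (j.length - i) - strip.length + 1 := List.mem_range.mp hp
    have hdd : (j.drop i).drop p = j.drop (i + p) := by
      rw [List.drop_drop]
    rw [hdd]
    by_cases ht : (j.drop (i + p)).take strip.length = strip
    · rw [if_pos ht, if_pos ht]
      congr 1
      have hidx : i + p + strip.length - (i + 1) = p + strip.length - 1 := by omega
      have hbound : p + strip.length - 1 < j.length - i := by omega
      rw [hidx]
      rw [List.getD_eq_getElem _ _ (by simpa using hbound)]
      rw [List.getElem_map, List.getElem_range']
      have harg : i + 1 + 1 * (p + strip.length - 1) = i + p + strip.length := by omega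
      rw [harg]
      have hsub : i + p - i = p := by omega
      rw [hsub]
      congr 1
      have hdd2 : (j.drop i).drop (p + strip.length) = j.drop (i + p + strip.length) := by
        rw [List.drop_drop, Nat.add_assoc]
      rw [hdd2]
      have hlen : (j.drop (i + p + strip.length)).length = j.length - (i + p + strip.length) := by
        simp
      exact pA_fuel_irrel l strip hs (j.length - (i + p + strip.length)) _ (by omega) _ _ (by omega) (by omega)
    · rw [if_neg ht, if_neg ht]

theorem pBtab_correct (l : String) (strip : List String) (j : List String) (hs : strip ≠ []) :
    ∀ k, k ≤ j.length + 1 →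
      pBtab l strip j k = (List.range' (j.length + 1 - k) k).map
        (fun t => pA l strip ((j.drop t).length + 1) (j.drop t)) := by
  intro k
  induction k with
  | zero => intro _; simp [pBtab]
  | succ k ih =>
    intro hk
    have hk' : k ≤ j.length := Nat.lt_succ_iff.mp hk
    have h1 : j.length + 1 - (k + 1) = j.length - k := by omega
    have h2 : j.length + 1 - k = (j.length - k) + 1 := by omega
    rw [pBtab]
    rw [ih (by omega), h2]
    rw [h1, List.range'_succ, List.map_cons]
    congr 1
    have h3 : j.length - (j.length - k) = k := by omega
    have := pBrow_correct l strip j hs (j.length - k) (by omega)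
    rw [h3] at this
    exact this

-- ===== VERDICT (by name: the statement is the Claim_ definition above) =====
theorem possible_stripped_journeys_spec : Claim_equal_possible_stripped_journeys := by
  intro l strip j _ hpre
  unfold Spec_possible_stripped_journeys possible_stripped_journeys possible_stripped_journeys_alt
  rw [pBtab_correct l strip j hpre (j.length + 1) le_rfl]
  simp [List.range'_succ]
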